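-- pv_equiv track=rewrite | github.com/zbtomal/Networking-Python | Simulation/bit_and_byte_stuffing.py | bit_stuffing
-- ===== SOURCE A (Python) =====
-- def bit_stuffing(data):
--     """Performs bit stuffing: insert a '0' after five consecutive '1's."""
--     stuffed = ""
--     count = 0
--     for bit in data:
--         stuffed += bit
--         if bit == '1':
--             count += 1
--             if count == 5:
--                 stuffed += '0'
--                 count = 0
--         else:
--             count = 0
--     return stuffed
-- ===== SOURCE B (Python) =====
-- def bit_stuffing(data):
--     """Performs bit stuffing: insert a '0' after five consecutive '1's."""
--     return data.replace('11111', '111110')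
-- ===== Notes on version B (the rewrite author's own statement) =====
-- stated objective: simpler
-- what changed: The per-character counter loop is replaced by a single non-overlapping str.replace('11111','111110'), which inserts a '0' after each run of five consecutive '1's exactly as the counter-with-reset does.
import Mathlib
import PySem

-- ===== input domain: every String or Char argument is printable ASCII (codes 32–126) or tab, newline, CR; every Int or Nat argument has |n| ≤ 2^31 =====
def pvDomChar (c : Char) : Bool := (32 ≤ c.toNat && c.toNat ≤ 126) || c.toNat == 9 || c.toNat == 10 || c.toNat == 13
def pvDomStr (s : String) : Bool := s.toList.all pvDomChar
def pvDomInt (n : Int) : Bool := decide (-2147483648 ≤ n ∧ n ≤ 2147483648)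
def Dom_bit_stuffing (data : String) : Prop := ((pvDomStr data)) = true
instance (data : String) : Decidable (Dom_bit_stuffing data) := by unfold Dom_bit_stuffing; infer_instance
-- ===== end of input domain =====

-- B replaces A's per-character counter loop with the closed-form data.replace('11111','111110'); simpler.

-- ===== PORT A =====
-- literal port of A's loop: state = (stuffed so far, run counter), one step per character
def bit_stuffing_step (st : List Char × Int) (bit : Char) : List Char × Int :=
  let stuffed := st.1 ++ [bit]
  if bit = '1' then
    if st.2 + 1 = 5 then (stuffed ++ ['0'], 0) else (stuffed, st.2 + 1)
  else (stuffed, 0)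

def bit_stuffing (data : String) : String :=
  String.ofList (data.toList.foldl bit_stuffing_step ([], 0)).1

-- ===== PORT B =====
def bit_stuffing_alt (data : String) : String :=
  PySem.Str.replace data "11111" "111110"

-- ===== PRECONDITION & SPEC =====
def Spec_bit_stuffing (data : String) (out : String) : Prop := out = bit_stuffing_alt data
instance (data : String) (out : String) : Decidable (Spec_bit_stuffing data out) := by unfold Spec_bit_stuffing; infer_instance

-- ===== CLAIM (what is proved, stated in full; the proofs are below) =====
def Claim_equal_bit_stuffing : Prop := ∀ (data : String), Dom_bit_stuffing data → Spec_bit_stuffing data (bit_stuffing data)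

-- ===== LEMMAS AND PROOFS =====

-- per-character specification of A's loop body, carrying the counter
def fSpec : List Char → Nat → List Char
  | [], _ => []
  | b :: t, c =>
    if b = '1' then
      if c + 1 = 5 then b :: '0' :: fSpec t 0 else b :: fSpec t (c + 1)
    else b :: fSpec t 0

-- recursive form of the non-overlapping replace for old = "11111", new = "111110"
def gRep : List Char → List Char
  | [] => []
  | c :: t =>
    if ['1','1','1','1','1'].isPrefixOf (c :: t) then
      '1' :: '1' :: '1' :: '1' :: '1' :: '0' :: gRep (List.drop 4 t)
    else c :: gRep t
termination_by l => l.length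
decreasing_by
  all_goals simp; try omega

lemma foldl_eq_fSpec (l : List Char) (acc : List Char) (c : Int) (hc : 0 ≤ c) :
    (l.foldl bit_stuffing_step (acc, c)).1 = acc ++ fSpec l c.toNat := by
  induction l generalizing acc c with
  | nil => simp [fSpec]
  | cons b t ih =>
    by_cases hb : b = '1'
    · by_cases h5 : c + 1 = 5
      · have : c.toNat + 1 = 5 := by omega
        simp [bit_stuffing_step, fSpec, hb, h5, this, ih _ 0 le_rfl]
      · have : ¬ (c.toNat + 1 = 5) := by omega
        have hcast : (c + 1).toNat = c.toNat + 1 := by omega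
        simp [bit_stuffing_step, fSpec, hb, h5, this, ih _ (c + 1) (by omega), hcast]
    · simp [bit_stuffing_step, fSpec, hb, ih _ 0 le_rfl]

lemma go_eq_gRep (fuel : Nat) (l acc : List Char) (hl : l.length ≤ fuel) :
    PySem.Chars.replace.go ['1','1','1','1','1'] ['1','1','1','1','1','0'] fuel l acc
      = acc.reverse ++ gRep l := by
  induction fuel generalizing l acc with
  | zero =>
    have : l = [] := by simpa using List.length_eq_zero_iff.mp (Nat.le_zero.mp hl)
    subst this; simp [PySem.Chars.replace.go, gRep]
  | succ fuel ih =>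
    cases l with
    | nil => simp [PySem.Chars.replace.go, gRep]
    | cons c t =>
      rw [PySem.Chars.replace.go]
      by_cases hp : ['1','1','1','1','1'].isPrefixOf (c :: t) = true
      · have hdrop : (List.drop 5 (c :: t)).length ≤ fuel := by
          simp at hl ⊢; omega
        rw [if_pos hp]
        have hlen : (['1','1','1','1','1'] : List Char).length = 5 := rfl
        rw [hlen, ih _ _ hdrop]
        rw [gRep, if_pos hp]
        simp
      · have ht : t.length ≤ fuel := by simp at hl; omega
        rw [if_neg hp, ih _ _ ht, gRep, if_neg hp]
        simp

-- the heart: the counter loop, seeded with c trailing ones, equals non-overlapping replace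
lemma fSpec_eq_gRep (l : List Char) (c : Nat) (hc : c < 5) :
    List.replicate c '1' ++ fSpec l c = gRep (List.replicate c '1' ++ l) := by
  induction l generalizing c with
  | nil =>
    interval_cases c <;> simp [fSpec, gRep, List.isPrefixOf]
  | cons b t ih =>
    by_cases hb : b = '1'
    · subst hb
      by_cases h5 : c + 1 = 5
      · have hc4 : c = 4 := by omega
        subst hc4
        have := ih 0 (by omega)
        simp [fSpec] at this ⊢
        rw [gRep]
        simp [List.isPrefixOf, this]
      · have := ih (c + 1) (by omega)
        have hrep : List.replicate c '1' ++ '1' :: t = List.replicate (c+1) '1' ++ t := by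
          simp [List.replicate_succ']
        rw [fSpec, if_pos rfl, if_neg h5, hrep, ← this, List.replicate_succ']
        simp
    · have := ih 0 (by omega)
      simp [fSpec, hb] at this ⊢
      have hb' : ¬ ('1' = b) := fun h => hb h.symm
      interval_cases c <;> simp [gRep, List.isPrefixOf, hb', this]

-- ===== VERDICT (by name: the statement is the Claim_ definition above) =====
theorem bit_stuffing_spec : Claim_equal_bit_stuffing := by
  intro data _
  unfold Spec_bit_stuffing bit_stuffing bit_stuffing_alt
  rw [foldl_eq_fSpec _ [] 0 le_rfl]
  have holds : PySem.Str.replace data "11111" "111110"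
      = String.ofList (PySem.Chars.replace data.toList "11111".toList "111110".toList) := rfl
  rw [holds]
  have hold : ("11111".toList : List Char) = ['1','1','1','1','1'] := by decide
  have hnew : ("111110".toList : List Char) = ['1','1','1','1','1','0'] := by decide
  rw [hold, hnew]
  rw [show PySem.Chars.replace data.toList ['1','1','1','1','1'] ['1','1','1','1','1','0']
      = PySem.Chars.replace.go ['1','1','1','1','1'] ['1','1','1','1','1','0']
          data.toList.length data.toList [] from by rw [PySem.Chars.replace]; rfl]
  rw [go_eq_gRep _ _ _ le_rfl]
  have := fSpec_eq_gRep data.toList 0 (by omega)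
  simp at this
  simp [this]
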